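-- pv_equiv track=rewrite | github.com/dogunyoye/advent-of-code-2016 | day24/day24.py | __fewest_steps
-- ===== SOURCE A (Python) =====
-- from collections import deque
-- from itertools import permutations
--
-- def __create_map(data) -> tuple:
--     layout = {}
--     locations = set()
--     start = (-1, -1)
--     for i, line in enumerate(data.splitlines()):
--         for j in range(0, len(line)):
--             if line[j] != "#":
--                 layout[(i, j)] = line[j]
--                 if line[j] == "0":
--                     start = (i, j)
--                 if line[j].isnumeric() and line[j] != "0":
--                     locations.add((i, j))
--     return layout, locations, start
--
-- def __fewest_steps(data, part_two) -> int:
--     layout, locations, start = __create_map(data)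
--     all_steps = []
--
--     for p in permutations(locations):
--         route = list(p)
--         route.insert(0, start)
--         if part_two:
--             route.append(start)
--         steps = 0
--
--         for i in range(0, len(route) - 1):
--             start_node, end_node = route[i], route[i + 1]
--             queue, visited = deque(), set()
--
--             queue.append((start_node, 0))
--             visited.add(start_node)
--
--             while len(queue) != 0:
--
--                 current = queue.popleft()
--                 current_position, current_steps = current[0], current[1]
--                 if current_position == end_node:
--                     steps += current_steps
--                     break
--
--                 i, j = current_position
--                 neighbors = [(i, j - 1), (i - 1, j), (i, j + 1), (i + 1, j)]
--
--                 for n in neighbors: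
--                     if n in layout and n not in visited:
--                         queue.append((n, current_steps + 1))
--                         visited.add(n)
--
--         all_steps.append(steps)
--
--     return min(all_steps)
-- ===== SOURCE B (Python) =====
-- from collections import deque
-- from itertools import permutations
--
-- def __create_map(data) -> tuple:
--     layout = {}
--     locations = set()
--     start = (-1, -1)
--     for i, line in enumerate(data.splitlines()):
--         for j in range(0, len(line)):
--             if line[j] != "#":
--                 layout[(i, j)] = line[j]
--                 if line[j] == "0":
--                     start = (i, j)
--                 if line[j].isnumeric() and line[j] != "0":
--                     locations.add((i, j))
--     return layout, locations, start
--
-- def __bfs(layout, start_node, end_node) -> int: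
--     # breadth-first search; an unreachable end_node costs 0 steps
--     queue, visited = deque(), set()
--     queue.append((start_node, 0))
--     visited.add(start_node)
--     while len(queue) != 0:
--         current_position, current_steps = queue.popleft()
--         if current_position == end_node:
--             return current_steps
--         i, j = current_position
--         for n in ((i, j - 1), (i - 1, j), (i, j + 1), (i + 1, j)):
--             if n in layout and n not in visited:
--                 queue.append((n, current_steps + 1))
--                 visited.add(n)
--     return 0
--
-- def __fewest_steps(data, part_two) -> int:
--     layout, locations, start = __create_map(data)
--     # precompute the pairwise distance matrix once, then solve the TSP over the
--     # matrix (instead of one BFS per leg of every permutation)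
--     nodes = [start] + list(locations)
--     dist = {(a, b): __bfs(layout, a, b) for a in nodes for b in nodes}
--     return min(
--         sum(dist[(route[i], route[i + 1])] for i in range(len(route) - 1))
--         for route in ([start] + list(p) + ([start] if part_two else [])
--                       for p in permutations(locations))
--     )
-- ===== Notes on version B (the rewrite author's own statement) =====
-- stated objective: alternative
-- what changed: Instead of running a fresh BFS for every leg of every permutation, B precomputes the pairwise BFS distance matrix over the numbered locations once and then solves the TSP by summing matrix lookups per permutation.
import Mathlib
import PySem

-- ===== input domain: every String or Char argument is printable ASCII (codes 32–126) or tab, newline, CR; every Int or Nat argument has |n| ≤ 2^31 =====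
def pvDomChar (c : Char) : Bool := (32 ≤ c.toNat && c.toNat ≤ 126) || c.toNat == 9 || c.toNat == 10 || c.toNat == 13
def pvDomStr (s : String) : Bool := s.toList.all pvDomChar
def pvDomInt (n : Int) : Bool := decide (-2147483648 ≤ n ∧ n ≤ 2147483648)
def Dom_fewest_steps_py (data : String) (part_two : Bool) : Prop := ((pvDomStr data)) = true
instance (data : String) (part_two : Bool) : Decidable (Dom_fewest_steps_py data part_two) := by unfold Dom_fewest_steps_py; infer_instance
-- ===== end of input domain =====

-- B replaces A's BFS-per-leg-per-permutation with ONE pairwise BFS distance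
-- matrix computed up front, then solves the TSP by summing matrix lookups per
-- permutation (a different decomposition; not measured faster on the generated
-- inputs). Parsing (__create_map) and the BFS subroutine are the same code in
-- both Python files, so both ports share pvCreateMap / pvBfs.

-- ===== PORT A =====

abbrev PVPos := Int × Int

-- shared helper: __create_map (identical in Source A and Source B).
-- line[j].isnumeric() is ported as PySem.Chars.isdigit, exact on the ASCII Dom.
def pvCreateMap (data : String) :
    PySem.Dict PVPos Char × PySem.Set PVPos × PVPos :=
  (PySem.List.enumerate (PySem.Str.splitlines data)).foldl
    (fun acc il =>
      (PySem.List.pyRange 0 (PySem.Str.len il.2) 1).foldl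
        (fun acc j =>
          match PySem.Str.pyGet? il.2 j with
          | none => acc   -- unreachable: j ranges over the indices of the line
          | some c =>
            if c ≠ '#' then
              (acc.1.insert (il.1, j) c,
               (if PySem.Chars.isdigit c && c ≠ '0' then PySem.Set.add acc.2.1 (il.1, j)
                else acc.2.1),
               (if c = '0' then (il.1, j) else acc.2.2))
            else acc)
        acc)
    (PySem.Dict.empty, PySem.Set.empty, (-1, -1))

def pvNeighbors (p : PVPos) : List PVPos :=
  [(p.1, p.2 - 1), (p.1 - 1, p.2), (p.1, p.2 + 1), (p.1 + 1, p.2)]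

-- one step of the 'for n in neighbors' loop: enqueue unvisited map cells
def pvEnqueue (layout : PySem.Dict PVPos Char) (st : Int)
    (qv : List (PVPos × Int) × PySem.Set PVPos) (n : PVPos) :
    List (PVPos × Int) × PySem.Set PVPos :=
  if layout.contains n && !(PySem.Set.contains qv.2 n) then
    (qv.1 ++ [(n, st + 1)], PySem.Set.add qv.2 n)
  else qv

-- the 'while len(queue) != 0' BFS loop (identical in Source A, inline, and Source B, __bfs);
-- returns the steps contributed: current_steps when end_node is popped, 0 when the
-- queue empties. Fuel: each iteration pops one entry, and every cell is enqueued at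
-- most once (it is marked visited when enqueued), so layout.size + 2 always suffices.
def pvBfsLoop (layout : PySem.Dict PVPos Char) (endNode : PVPos) :
    Nat → List (PVPos × Int) → PySem.Set PVPos → Int
  | 0, _, _ => 0
  | _ + 1, [], _ => 0
  | fuel + 1, (p, st) :: rest, visited =>
    if p = endNode then st
    else
      let qv := (pvNeighbors p).foldl (pvEnqueue layout st) (rest, visited)
      pvBfsLoop layout endNode fuel qv.1 qv.2

def pvBfs (layout : PySem.Dict PVPos Char) (s e : PVPos) : Int :=
  pvBfsLoop layout e (layout.size + 2) [(s, 0)] (PySem.Set.add PySem.Set.empty s)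

-- A's body of 'for p in permutations(locations)': build the route, then run one
-- BFS per leg, summing the steps. route[i] is always in range, so pyGetD is exact.
def aPermSteps (layout : PySem.Dict PVPos Char) (start : PVPos) (part_two : Bool)
    (p : List PVPos) : Int :=
  let route0 := PySem.List.insert p 0 start
  let route := if part_two then route0 ++ [start] else route0
  (PySem.List.pyRange 0 ((route.length : Int) - 1) 1).foldl
    (fun steps i =>
      steps + pvBfs layout (PySem.List.pyGetD route i (-1, -1))
                           (PySem.List.pyGetD route (i + 1) (-1, -1))) 0

-- min(all_steps): all_steps is nonempty (permutations always yields ≥ 1 tuple),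
-- so min? is some and the .getD default is never used.
def fewest_steps_py (data : String) (part_two : Bool) : Int :=
  let m := pvCreateMap data
  let all_steps := (PySem.List.permutations m.2.1 m.2.1.length).foldl
    (fun all p => all ++ [aPermSteps m.1 m.2.2 part_two p]) []
  (PySem.List.min? all_steps (fun x => x)).getD 0

-- ===== PORT B =====

-- the dict comprehension {(a, b): __bfs(layout, a, b) for a in nodes for b in nodes}
def bDistMatrix (layout : PySem.Dict PVPos Char) (nodes : List PVPos) :
    PySem.Dict (PVPos × PVPos) Int :=
  nodes.foldl
    (fun d a => nodes.foldl (fun d b => d.insert (a, b) (pvBfs layout a b)) d)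
    PySem.Dict.empty

-- sum(dist[(route[i], route[i+1])] for i in range(len(route)-1)); the key is
-- always present (route elements are nodes), so getD's default is never used.
def bPermTotal (dist : PySem.Dict (PVPos × PVPos) Int) (start : PVPos)
    (part_two : Bool) (p : List PVPos) : Int :=
  let route := (start :: p) ++ (if part_two then [start] else [])
  ((PySem.List.pyRange 0 ((route.length : Int) - 1) 1).map
    (fun i => dist.getD (PySem.List.pyGetD route i (-1, -1),
                         PySem.List.pyGetD route (i + 1) (-1, -1)) 0)).sum

def fewest_steps_py_alt (data : String) (part_two : Bool) : Int :=
  let m := pvCreateMap data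
  let nodes := m.2.2 :: m.2.1
  let dist := bDistMatrix m.1 nodes
  (PySem.List.min?
    ((PySem.List.permutations m.2.1 m.2.1.length).map (bPermTotal dist m.2.2 part_two))
    (fun x => x)).getD 0

-- ===== PRECONDITION & SPEC =====
def Spec_fewest_steps_py (data : String) (part_two : Bool) (out : Int) : Prop := out = fewest_steps_py_alt data part_two
instance (data : String) (part_two : Bool) (out : Int) : Decidable (Spec_fewest_steps_py data part_two out) := by unfold Spec_fewest_steps_py; infer_instance

-- ===== CLAIM (what is proved, stated in full; the proofs are below) =====
def Claim_equal_fewest_steps_py : Prop := ∀ (data : String) (part_two : Bool), Dom_fewest_steps_py data part_two → Spec_fewest_steps_py data part_two (fewest_steps_py data part_two)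

-- ===== LEMMAS AND PROOFS =====

-- lookup in the inner fold of the dict comprehension (fixed first component a0)
theorem pv_getD_inner (layout : PySem.Dict PVPos Char) (a0 : PVPos)
    (m : List PVPos) : ∀ (d : PySem.Dict (PVPos × PVPos) Int) (k : PVPos × PVPos),
    (m.foldl (fun d b => d.insert (a0, b) (pvBfs layout a0 b)) d).getD k 0
      = if k.1 = a0 ∧ k.2 ∈ m then pvBfs layout k.1 k.2 else d.getD k 0 := by
  induction m with
  | nil => intro d k; simp
  | cons b t ih =>
    intro d k
    rcases k with ⟨k1, k2⟩
    simp only [List.foldl_cons, ih, PySem.Dict.getD_insert, List.mem_cons]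
    by_cases h1 : k1 = a0
    · subst h1
      by_cases h2 : k2 ∈ t
      · simp [h2]
      · by_cases h3 : k2 = b <;> simp [h2, h3, Prod.ext_iff]
    · simp [h1, Prod.ext_iff]

-- lookup in the whole dict comprehension
theorem pv_getD_matrix (layout : PySem.Dict PVPos Char) (m : List PVPos)
    (l : List PVPos) : ∀ (d : PySem.Dict (PVPos × PVPos) Int) (k : PVPos × PVPos),
    (l.foldl (fun d a => m.foldl (fun d b => d.insert (a, b) (pvBfs layout a b)) d) d).getD k 0
      = if k.1 ∈ l ∧ k.2 ∈ m then pvBfs layout k.1 k.2 else d.getD k 0 := by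
  induction l with
  | nil => intro d k; simp
  | cons a t ih =>
    intro d k
    simp only [List.foldl_cons, ih, pv_getD_inner, List.mem_cons]
    by_cases hm : k.2 ∈ m
    · by_cases h1 : k.1 ∈ t
      · simp [h1, hm]
      · by_cases h2 : k.1 = a <;> simp [h1, h2, hm]
    · simp [hm]

-- per-route agreement: one BFS per leg (A) = matrix lookups (B), for any route
-- whose cells are among the matrix's nodes
theorem pv_route_eq (layout : PySem.Dict PVPos Char) (nodes : List PVPos)
    (r : List PVPos) (hr : ∀ x ∈ r, x ∈ nodes) :
    (PySem.List.pyRange 0 ((r.length : Int) - 1) 1).foldl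
      (fun steps i =>
        steps + pvBfs layout (PySem.List.pyGetD r i (-1, -1))
                             (PySem.List.pyGetD r (i + 1) (-1, -1))) 0
      = ((PySem.List.pyRange 0 ((r.length : Int) - 1) 1).map
          (fun i => (bDistMatrix layout nodes).getD
            (PySem.List.pyGetD r i (-1, -1), PySem.List.pyGetD r (i + 1) (-1, -1)) 0)).sum := by
  rw [PySem.List.foldl_add, zero_add]
  congr 1
  apply List.map_congr_left
  intro i hi
  rw [PySem.List.mem_pyRange_one] at hi
  have hlen : i + 1 < (r.length : Int) := by omega
  have h1 : PySem.List.pyGetD r i (-1, -1) ∈ nodes := by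
    rw [PySem.List.pyGetD_eq_getElem r (-1, -1) hi.1 (by omega)]
    exact hr _ (List.getElem_mem _)
  have h2 : PySem.List.pyGetD r (i + 1) (-1, -1) ∈ nodes := by
    rw [PySem.List.pyGetD_eq_getElem r (-1, -1) (by omega) hlen]
    exact hr _ (List.getElem_mem _)
  rw [bDistMatrix, pv_getD_matrix]
  simp [h1, h2]

-- per-permutation agreement
theorem pv_perm_eq (layout : PySem.Dict PVPos Char) (locs : List PVPos)
    (start : PVPos) (part_two : Bool) (p : List PVPos)
    (hp : ∀ x ∈ p, x ∈ locs) :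
    aPermSteps layout start part_two p
      = bPermTotal (bDistMatrix layout (start :: locs)) start part_two p := by
  have hroute : (if part_two then PySem.List.insert p 0 start ++ [start]
                 else PySem.List.insert p 0 start)
      = (start :: p) ++ (if part_two then [start] else []) := by
    cases part_two <;> simp [PySem.List.insert_zero]
  unfold aPermSteps bPermTotal
  simp only [hroute]
  apply pv_route_eq
  intro x hx
  rcases List.mem_append.mp hx with hx | hx
  · rcases List.mem_cons.mp hx with hx | hx
    · simp [hx]
    · exact List.mem_cons_of_mem _ (hp x hx)
  · cases part_two <;> simp_all

theorem pv_main (data : String) (part_two : Bool) :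
    fewest_steps_py data part_two = fewest_steps_py_alt data part_two := by
  simp only [fewest_steps_py, fewest_steps_py_alt,
    PySem.List.foldl_append_singleton_eq_map, List.nil_append]
  congr 2
  apply List.map_congr_left
  intro p hp
  exact pv_perm_eq _ _ _ _ p
    (fun x hx => (PySem.List.perm_of_mem_permutations hp).mem_iff.mp hx)

-- ===== VERDICT (by name: the statement is the Claim_ definition above) =====
theorem fewest_steps_py_spec : Claim_equal_fewest_steps_py := by
  intro data part_two _
  unfold Spec_fewest_steps_py
  exact pv_main data part_two
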